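-- pv_equiv track=rewrite | github.com/IBAMR/IBAMR | scripts/maintenance/rewrite_samrai_compatibility_file.py | _mask_protected_code_tokens
-- ===== SOURCE A (Python) =====
-- from typing import Dict, List, Sequence, Set, Tuple
--
-- PROTECTED_CODE_TOKENS = (
--     "IBTK::FACPreconditioner",
--     "IBTK::FACPreconditionerStrategy",
--     "IBMethod",
--     "IBStrategy",
--     "IBImplicitStrategy",
-- )
--
-- def _mask_protected_code_tokens(text: str) -> Tuple[str, Dict[str, str]]:
--     token_to_chunk: Dict[str, str] = {}
--     out = text
--     for i, chunk in enumerate(PROTECTED_CODE_TOKENS):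
--         token = f"__SAMRAI_REWRITE_PROTECTED_{i}__"
--         if chunk in out:
--             out = out.replace(chunk, token)
--             token_to_chunk[token] = chunk
--     return out, token_to_chunk
-- ===== SOURCE B (Python) =====
-- from typing import Dict, Tuple
--
-- PROTECTED_CODE_TOKENS = (
--     "IBTK::FACPreconditioner",
--     "IBTK::FACPreconditionerStrategy",
--     "IBMethod",
--     "IBStrategy",
--     "IBImplicitStrategy",
-- )
--
-- _PLACEHOLDERS = tuple(
--     "__SAMRAI_REWRITE_PROTECTED_%d__" % i for i in range(len(PROTECTED_CODE_TOKENS))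
-- )
--
--
-- def _mask_protected_code_tokens(text: str) -> Tuple[str, Dict[str, str]]:
--     # Single left-to-right pass: at each position try the tokens in index order
--     # (so the index-0 prefix wins over its index-1 superstring, as in the
--     # sequential-replacement original), emit a placeholder on a match.
--     parts = []
--     used = set()
--     i = 0
--     n = len(text)
--     while i < n:
--         for k, tok in enumerate(PROTECTED_CODE_TOKENS):
--             if text.startswith(tok, i):
--                 parts.append(_PLACEHOLDERS[k])
--                 used.add(k)
--                 i += len(tok)
--                 break
--         else:
--             parts.append(text[i])
--             i += 1
--     mapping = {
--         _PLACEHOLDERS[k]: PROTECTED_CODE_TOKENS[k]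
--         for k in range(len(PROTECTED_CODE_TOKENS))
--         if k in used
--     }
--     return "".join(parts), mapping
-- ===== Notes on version B (the rewrite author's own statement) =====
-- stated objective: alternative
-- what changed: Replaces the five sequential whole-string str.replace passes (plus per-pass containment tests) with a single left-to-right scan that tries the tokens in index order at each position, collecting the set of matched token indices in the same pass and building the mapping from that set in index order.
import Mathlib
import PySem

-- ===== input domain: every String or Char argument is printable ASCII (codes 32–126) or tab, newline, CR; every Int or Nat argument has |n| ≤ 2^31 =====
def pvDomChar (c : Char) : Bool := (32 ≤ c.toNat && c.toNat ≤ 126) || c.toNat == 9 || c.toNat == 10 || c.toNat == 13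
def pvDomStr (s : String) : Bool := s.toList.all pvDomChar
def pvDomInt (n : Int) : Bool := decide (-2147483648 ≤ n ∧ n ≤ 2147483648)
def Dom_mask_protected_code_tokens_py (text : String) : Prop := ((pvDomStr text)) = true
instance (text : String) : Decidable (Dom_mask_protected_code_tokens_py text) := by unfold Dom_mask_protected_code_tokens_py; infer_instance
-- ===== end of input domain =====

-- B replaces A's five sequential whole-string `str.replace` passes by a single
-- left-to-right scan that tries the tokens in index order at each position and
-- collects the matched indices in the same pass (objective: alternative).

-- ===== PORT A =====
def pvTokensA : List String :=
  ["IBTK::FACPreconditioner", "IBTK::FACPreconditionerStrategy", "IBMethod", "IBStrategy", "IBImplicitStrategy"]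

def mask_protected_code_tokens_py (text : String) : String × (List (String × String)) :=
  let res := (PySem.List.enumerate pvTokensA 0).foldl
    (fun (st : String × PySem.Dict String String) (p : Int × String) =>
      let token := "__SAMRAI_REWRITE_PROTECTED_" ++ PySem.Int.toStr p.1 ++ "__"
      if PySem.Str.isIn p.2 st.1 then (PySem.Str.replace st.1 p.2 token, st.2.insert token p.2)
      else st)
    (text, PySem.Dict.empty)
  (res.1, res.2.items)

-- ===== PORT B =====
def pvTokensB : List String :=
  ["IBTK::FACPreconditioner", "IBTK::FACPreconditionerStrategy", "IBMethod", "IBStrategy", "IBImplicitStrategy"]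

def pvPlaceholders : List String :=
  (List.range pvTokensB.length).map (fun i => "__SAMRAI_REWRITE_PROTECTED_" ++ PySem.Int.toStr i ++ "__")

-- the while-loop of Source B: at each position try the tokens in index order
def pvScan (cs : List Char) (used : PySem.Set Int) : List Char × PySem.Set Int :=
  match cs with
  | [] => ([], used)
  | c :: cs' =>
    match (PySem.List.enumerate pvTokensB 0).find? (fun p => p.2.toList.isPrefixOf (c :: cs')) with
    | some p =>
        let r := pvScan (cs'.drop (p.2.toList.length - 1)) (used.add p.1)
        ((PySem.List.pyGetD pvPlaceholders p.1 "").toList ++ r.1, r.2)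
    | none =>
        let r := pvScan cs' used
        (c :: r.1, r.2)
  termination_by cs.length
  decreasing_by all_goals simp

def mask_protected_code_tokens_py_alt (text : String) : String × (List (String × String)) :=
  let r := pvScan text.toList PySem.Set.empty
  let mapping := ((PySem.List.pyRange 0 pvTokensB.length 1).filter (fun k => PySem.Set.contains r.2 k)).foldl
      (fun (d : PySem.Dict String String) k =>
        d.insert (PySem.List.pyGetD pvPlaceholders k "") (PySem.List.pyGetD pvTokensB k "")) PySem.Dict.empty
  (String.ofList r.1, mapping.items)

-- ===== PRECONDITION & SPEC =====
def Spec_mask_protected_code_tokens_py (text : String) (out : String × (List (String × String))) : Prop := out = mask_protected_code_tokens_py_alt text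
instance (text : String) (out : String × (List (String × String))) : Decidable (Spec_mask_protected_code_tokens_py text out) := by unfold Spec_mask_protected_code_tokens_py; infer_instance

-- ===== CLAIM (what is proved, stated in full; the proofs are below) =====
def Claim_equal_mask_protected_code_tokens_py : Prop := ∀ (text : String), Dom_mask_protected_code_tokens_py text → Spec_mask_protected_code_tokens_py text (mask_protected_code_tokens_py text)

-- ===== LEMMAS AND PROOFS =====

-- k-th token / placeholder as character lists (proof-side bookkeeping)
def tokL (k : Nat) : List Char := (pvTokensB.getD k "").toList
def phL (k : Nat) : List Char := (pvPlaceholders.getD k "").toList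

-- leftmost non-overlapping replace-all, the shape of PySem.Chars.replace for a nonempty pattern
def repC (t r : List Char) : List Char → List Char
  | [] => []
  | c :: l' =>
    if t.isPrefixOf (c :: l') then r ++ repC t r (l'.drop (t.length - 1))
    else c :: repC t r l'
  termination_by l => l.length
  decreasing_by all_goals simp

-- text after A's first k replace passes
def stage : Nat → List Char → List Char
  | 0, cs => cs
  | k+1, cs => repC (tokL k) (phL k) (stage k cs)

-- "token k is present when A's pass k looks for it"
abbrev flagP (k : Nat) (cs : List Char) : Prop := tokL k <:+: stage k cs

-- no occurrence of t starts inside the block p (neither within p nor crossing its right edge)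
abbrev crossFree (p t : List Char) : Prop := ∀ k, k < p.length → ¬ t <+: p.drop k ∧ ¬ p.drop k <+: t


lemma repC_nil (t r : List Char) : repC t r [] = [] := by rw [repC]

lemma repC_hit {t : List Char} (r : List Char) {l : List Char} (ht : t ≠ []) (h : t.isPrefixOf l) :
    repC t r l = r ++ repC t r (l.drop t.length) := by
  cases l with
  | nil => cases t with
    | nil => exact absurd rfl ht
    | cons a t' => simp [List.isPrefixOf] at h
  | cons c l' =>
    rw [repC, if_pos h]
    cases t with
    | nil => exact absurd rfl ht
    | cons a t'' => simp [List.drop_succ_cons]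

lemma repC_miss {t : List Char} (r : List Char) {c : Char} {l' : List Char}
    (h : ¬ t.isPrefixOf (c :: l')) : repC t r (c :: l') = c :: repC t r l' := by
  rw [repC]; simp [h]

lemma go_eq (t r : List Char) (ht : t ≠ []) :
    ∀ fuel : Nat, ∀ l acc : List Char, l.length ≤ fuel →
      PySem.Chars.replace.go t r fuel l acc = acc.reverse ++ repC t r l := by
  intro fuel
  induction fuel with
  | zero =>
    intro l acc hl
    have : l = [] := by cases l <;> simp_all
    subst this
    rw [PySem.Chars.replace.go]
    simp [repC_nil]
  | succ n ih =>
    intro l acc hl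
    cases l with
    | nil =>
      rw [PySem.Chars.replace.go]
      simp [repC_nil]
      omega
    | cons c l' =>
      rw [PySem.Chars.replace.go]
      by_cases h : t.isPrefixOf (c :: l')
      · rw [if_pos h]
        have hlen : ((c :: l').drop t.length).length ≤ n := by
          have h1 : 1 ≤ t.length := by cases t <;> simp_all
          simp [List.length_drop] at *
          omega
        rw [ih _ _ hlen, repC_hit r ht h]
        simp
      · rw [if_neg h]
        rw [ih _ _ (by simpa using Nat.le_of_succ_le_succ hl)]
        rw [repC, if_neg h]
        simp

lemma repC_eq_replace {t : List Char} (r l : List Char) (ht : t ≠ []) :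
    PySem.Chars.replace l t r = repC t r l := by
  rw [PySem.Chars.replace]
  rw [if_neg (by simpa [List.isEmpty_iff] using ht)]
  simpa using go_eq t r ht l.length l [] le_rfl

lemma not_prefix_append_of_crossFree {p t : List Char} (h : crossFree p t) {k : Nat}
    (hk : k < p.length) (u : List Char) : ¬ t <+: p.drop k ++ u := by
  intro hpre
  rcases List.prefix_or_prefix_of_prefix hpre (List.prefix_append _ u) with h1 | h1
  · exact (h k hk).1 h1
  · exact (h k hk).2 h1

lemma crossFree_tail {c : Char} {p t : List Char} (h : crossFree (c :: p) t) : crossFree p t := by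
  intro k hk
  exact h (k+1) (by simpa using Nat.succ_lt_succ hk)

lemma repC_skip {p t : List Char} (r u : List Char) (h : crossFree p t) :
    repC t r (p ++ u) = p ++ repC t r u := by
  induction p with
  | nil => rfl
  | cons c p' ih =>
    have hm : ¬ t.isPrefixOf (c :: (p' ++ u)) := by
      rw [List.isPrefixOf_iff_prefix]
      simpa using not_prefix_append_of_crossFree h (k := 0) (by simp) u
    rw [List.cons_append, repC_miss r hm, ih (crossFree_tail h), List.cons_append]

lemma infix_skip {p t : List Char} (u : List Char) (h : crossFree p t) :
    t <:+: p ++ u ↔ t <:+: u := by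
  induction p with
  | nil => simp
  | cons c p' ih =>
    rw [List.cons_append, List.infix_cons_iff]
    constructor
    · rintro (h1 | h1)
      · exact absurd h1 (by simpa using not_prefix_append_of_crossFree h (k := 0) (by simp) u)
      · exact (ih (crossFree_tail h)).mp h1
    · intro h1
      exact Or.inr ((ih (crossFree_tail h)).mpr h1)

lemma repC_noNew {t p : List Char} (hp : p.head? = some '_') :
    ∀ n : Nat, ∀ u : List Char, u.length ≤ n → ∀ t' : List Char, '_' ∉ t' →
      t' <+: repC t p u → t' <+: u := by
  intro n
  induction n with
  | zero =>
    intro u hu t' _ h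
    have : u = [] := by cases u <;> simp_all
    subst this
    simpa [repC_nil] using h
  | succ m ih =>
    intro u hu t' ht' h
    cases u with
    | nil => simpa [repC_nil] using h
    | cons c u' =>
      rw [repC] at h
      split at h
      · cases t' with
        | nil => exact List.nil_prefix
        | cons a t3 =>
          exfalso
          cases p with
          | nil => simp at hp
          | cons pc p' =>
            have : a = pc := (List.cons_prefix_cons.mp h).1
            simp at hp
            subst hp this
            exact ht' (by simp)
      · cases t' with
        | nil => exact List.nil_prefix
        | cons a t3 =>
          rcases List.cons_prefix_cons.mp h with ⟨hac, h3⟩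
          subst hac
          have := ih u' (by simpa using Nat.le_of_succ_le_succ hu) t3
            (fun hm => ht' (by simp [hm])) h3
          exact List.cons_prefix_cons.mpr ⟨rfl, this⟩

lemma repC_id_of_not_infix {t : List Char} (r : List Char) :
    ∀ l : List Char, ¬ t <:+: l → repC t r l = l := by
  intro l
  induction l with
  | nil => intro _; exact repC_nil t r
  | cons c l' ih =>
    intro h
    rw [repC, if_neg, ih (fun hi => h (List.infix_cons hi))]
    intro hpre
    exact h (List.isPrefixOf_iff_prefix.mp hpre).isInfix

lemma fact_tok_ne : ∀ k, k < 5 → tokL k ≠ [] := by decide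
lemma fact_tok_nous : ∀ k, k < 5 → '_' ∉ tokL k := by decide
lemma fact_ph_head : ∀ k, k < 5 → (phL k).head? = some '_' := by decide
lemma fact_tok01 : tokL 0 <+: tokL 1 := by decide
lemma fact_cf_tok : ∀ j, 2 ≤ j → j < 5 → ∀ i, i < j → crossFree (tokL j) (tokL i) := by decide
lemma fact_cf_ph : ∀ j, j < 5 → ∀ i, i < 5 → crossFree (phL j) (tokL i) := by decide

lemma stage_nil : ∀ i : Nat, stage i [] = [] := by
  intro i
  induction i with
  | zero => rfl
  | succ m ih => rw [stage, ih, repC_nil]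

lemma stage_decomp {j : Nat} (hj : j < 5) (hcf : ∀ i, i < j → crossFree (tokL j) (tokL i))
    (rest : List Char) :
    (∀ i, i ≤ j → stage i (tokL j ++ rest) = tokL j ++ stage i rest) ∧
    (∀ i, j < i → i ≤ 5 → stage i (tokL j ++ rest) = phL j ++ stage i rest) := by
  have part1 : ∀ i, i ≤ j → stage i (tokL j ++ rest) = tokL j ++ stage i rest := by
    intro i hi
    induction i with
    | zero => rfl
    | succ m ih =>
      rw [stage, ih (Nat.le_of_succ_le hi), repC_skip _ _ (hcf m (Nat.lt_of_succ_le hi)), stage]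
  refine ⟨part1, ?_⟩
  intro i hji hi5
  induction i with
  | zero => omega
  | succ m ih =>
    rcases Nat.lt_or_ge j m with hlt | hge
    · rw [stage, ih hlt (by omega), repC_skip _ _ (fact_cf_ph j hj m (by omega)), stage]
    · have hjm : j = m := by omega
      subst hjm
      calc stage (j+1) (tokL j ++ rest)
          = repC (tokL j) (phL j) (tokL j ++ stage j rest) := by rw [stage, part1 j le_rfl]
        _ = phL j ++ repC (tokL j) (phL j) ((tokL j ++ stage j rest).drop (tokL j).length) :=
            repC_hit _ (fact_tok_ne j hj)
              (List.isPrefixOf_iff_prefix.mpr (List.prefix_append _ _))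
        _ = phL j ++ stage (j+1) rest := by rw [List.drop_left, stage]

lemma flag_decomp {j : Nat} (hj : j < 5) (hcf : ∀ i, i < j → crossFree (tokL j) (tokL i))
    (rest : List Char) :
    ∀ i, i < 5 → (flagP i (tokL j ++ rest) ↔ (i = j ∨ flagP i rest)) := by
  intro i hi
  unfold flagP
  rcases Nat.lt_trichotomy i j with hij | hij | hij
  · rw [(stage_decomp hj hcf rest).1 i (le_of_lt hij), infix_skip _ (hcf i hij)]
    constructor
    · exact Or.inr
    · rintro (h | h)
      · omega
      · exact h
  · subst hij
    rw [(stage_decomp hj hcf rest).1 i le_rfl]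
    constructor
    · intro _; exact Or.inl rfl
    · intro _; exact (List.prefix_append _ _).isInfix
  · rw [(stage_decomp hj hcf rest).2 i hij (by omega), infix_skip _ (fact_cf_ph j hj i hi)]
    constructor
    · exact Or.inr
    · rintro (h | h)
      · omega
      · exact h

lemma noNew_stage : ∀ i : Nat, i ≤ 5 → ∀ cs t' : List Char, '_' ∉ t' →
    t' <+: stage i cs → t' <+: cs := by
  intro i
  induction i with
  | zero => intro _ cs t' _ h; exact h
  | succ m ih =>
    intro hm cs t' ht h
    rw [stage] at h
    have h2 := repC_noNew (fact_ph_head m (by omega)) (stage m cs).length (stage m cs) le_rfl t' ht h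
    exact ih (by omega) cs t' ht h2

lemma not_prefix_cons_stage {i : Nat} (hi : i < 5) {c : Char} {cs' : List Char}
    (h : ¬ tokL i <+: (c :: cs')) : ¬ tokL i <+: (c :: stage i cs') := by
  intro hpre
  cases htok : tokL i with
  | nil => exact fact_tok_ne i hi htok
  | cons a t3 =>
    rw [htok] at hpre
    rcases List.cons_prefix_cons.mp hpre with ⟨hac, h3⟩
    subst hac
    have h4 := noNew_stage i (by omega) cs' t3
      (fun hmem => fact_tok_nous i hi (htok ▸ List.mem_cons_of_mem _ hmem)) h3
    exact h (htok ▸ List.cons_prefix_cons.mpr ⟨rfl, h4⟩)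

lemma stage_cons {c : Char} {cs' : List Char} (h : ∀ i, i < 5 → ¬ tokL i <+: (c :: cs')) :
    ∀ i, i ≤ 5 → stage i (c :: cs') = c :: stage i cs' := by
  intro i
  induction i with
  | zero => intro _; rfl
  | succ m ih =>
    intro hm
    have hmiss : ¬ (tokL m).isPrefixOf (c :: stage m cs') := by
      rw [List.isPrefixOf_iff_prefix]
      exact not_prefix_cons_stage (by omega) (h m (by omega))
    rw [stage, ih (by omega), repC_miss _ hmiss, stage]

lemma flag_cons {c : Char} {cs' : List Char} (h : ∀ i, i < 5 → ¬ tokL i <+: (c :: cs')) :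
    ∀ i, i < 5 → (flagP i (c :: cs') ↔ flagP i cs') := by
  intro i hi
  unfold flagP
  rw [stage_cons h i (by omega), List.infix_cons_iff]
  constructor
  · rintro (h1 | h1)
    · exact absurd h1 (not_prefix_cons_stage hi (h i hi))
    · exact h1
  · exact Or.inr




def dAfter (cs : List Char) : Nat → PySem.Dict String String
  | 0 => PySem.Dict.empty
  | k+1 => if flagP k cs then (dAfter cs k).insert (pvPlaceholders.getD k "") (pvTokensB.getD k "")
           else dAfter cs k

lemma stepF {cs : List Char} (k : Nat) (hk : k < 5) (s : String)
    (hs : s.toList = stage k cs) :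
    (if PySem.Str.isIn (pvTokensB.getD k "") s = true then
       (PySem.Str.replace s (pvTokensB.getD k "")
          ("__SAMRAI_REWRITE_PROTECTED_" ++ PySem.Int.toStr (k : Int) ++ "__"),
        (dAfter cs k).insert ("__SAMRAI_REWRITE_PROTECTED_" ++ PySem.Int.toStr (k : Int) ++ "__")
          (pvTokensB.getD k ""))
     else (s, dAfter cs k)) =
    (String.ofList (stage (k+1) cs), dAfter cs (k+1)) := by
  rw [show dAfter cs (k+1) = if flagP k cs then (dAfter cs k).insert (pvPlaceholders.getD k "") (pvTokensB.getD k "") else dAfter cs k from rfl]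
  have hiff : PySem.Str.isIn (pvTokensB.getD k "") s = true ↔ flagP k cs := by
    rw [PySem.Str.isIn_iff_infix, hs]
    unfold flagP tokL
    rfl
  have htok : ("__SAMRAI_REWRITE_PROTECTED_" ++ PySem.Int.toStr (k : Int) ++ "__")
      = pvPlaceholders.getD k "" := by
    interval_cases k <;> decide
  by_cases hf : flagP k cs
  · rw [if_pos (hiff.mpr hf), if_pos hf, htok]
    refine Prod.ext ?_ rfl
    show PySem.Str.replace s (pvTokensB.getD k "") (pvPlaceholders.getD k "") = _
    rw [PySem.Str.replace]
    congr 1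
    rw [hs]
    rw [show (pvTokensB.getD k "").toList = tokL k from rfl]
    rw [show (pvPlaceholders.getD k "").toList = phL k from rfl]
    rw [repC_eq_replace _ _ (fact_tok_ne k hk)]
    rfl
  · rw [if_neg (fun hb => hf (hiff.mp hb)), if_neg hf]
    refine Prod.ext ?_ rfl
    show s = String.ofList (stage (k+1) cs)
    have h1 : stage (k+1) cs = stage k cs := by
      rw [stage]
      exact repC_id_of_not_infix _ _ hf
    rw [h1, ← hs, String.ofList_toList]

lemma henumA : PySem.List.enumerate pvTokensA 0 =
    [(((0:Nat):Int), pvTokensB.getD 0 ""), (((1:Nat):Int), pvTokensB.getD 1 ""),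
     (((2:Nat):Int), pvTokensB.getD 2 ""), (((3:Nat):Int), pvTokensB.getD 3 ""),
     (((4:Nat):Int), pvTokensB.getD 4 "")] := by decide

lemma portA_char : ∀ text : String,
    mask_protected_code_tokens_py text =
      (String.ofList (stage 5 text.toList), (dAfter text.toList 5).items) := by
  intro text
  unfold mask_protected_code_tokens_py
  rw [henumA]
  simp only [List.foldl_cons, List.foldl_nil]
  rw [show (PySem.Dict.empty : PySem.Dict String String) = dAfter text.toList 0 from rfl]
  simp only [stepF (cs := text.toList) 0 (by omega) text rfl]
  simp only [stepF (cs := text.toList) 1 (by omega) (String.ofList (stage 1 text.toList)) String.toList_ofList]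
  simp only [stepF (cs := text.toList) 2 (by omega) (String.ofList (stage 2 text.toList)) String.toList_ofList]
  simp only [stepF (cs := text.toList) 3 (by omega) (String.ofList (stage 3 text.toList)) String.toList_ofList]
  simp only [stepF (cs := text.toList) 4 (by omega) (String.ofList (stage 4 text.toList)) String.toList_ofList]

def SP (cs : List Char) (used : PySem.Set Int) : Prop :=
  (pvScan cs used).1 = stage 5 cs ∧
  (∀ k : Nat, k < 5 →
    (PySem.Set.contains (pvScan cs used).2 (k : Int) = true ↔
      (PySem.Set.contains used (k : Int) = true ∨ flagP k cs)))

lemma scan_nil (used : PySem.Set Int) : SP [] used := by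
  constructor
  · simp [pvScan, stage_nil]
  · intro k hk
    have hnf : ¬ flagP k [] := by
      unfold flagP
      rw [stage_nil]
      intro h
      exact fact_tok_ne k hk (List.eq_nil_of_infix_nil h)
    simp [pvScan, hnf]

lemma scan_step {m j : Nat} (hj : j < 5) (hcf : ∀ i, i < j → crossFree (tokL j) (tokL i))
    (ih : ∀ cs : List Char, cs.length ≤ m → ∀ used : PySem.Set Int, SP cs used)
    {c : Char} {cs' : List Char} (hlen : cs'.length ≤ m) (used : PySem.Set Int)
    (hpre : tokL j <+: (c :: cs'))
    (hfind : (PySem.List.enumerate pvTokensB 0).find? (fun p => p.2.toList.isPrefixOf (c :: cs'))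
       = some ((j:Int), pvTokensB.getD j "")) :
    SP (c :: cs') used := by
  have hscan : pvScan (c :: cs') used =
      (phL j ++ (pvScan (cs'.drop ((tokL j).length - 1)) (used.add (j:Int))).1,
       (pvScan (cs'.drop ((tokL j).length - 1)) (used.add (j:Int))).2) := by
    rw [pvScan, hfind]
    simp [PySem.List.pyGetD_natCast, phL, tokL]
  have htlen : 1 ≤ (tokL j).length := by
    cases htk : tokL j with
    | nil => exact absurd htk (fact_tok_ne j hj)
    | cons a t => simp
  have hsplit : c :: cs' = tokL j ++ cs'.drop ((tokL j).length - 1) := by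
    obtain ⟨r0, hr0⟩ := hpre
    have hdrop := congrArg (List.drop (tokL j).length) hr0
    rw [List.drop_left] at hdrop
    rw [show (tokL j).length = ((tokL j).length - 1) + 1 from by omega, List.drop_succ_cons] at hdrop
    rw [← hdrop]
    exact hr0.symm
  set rest := cs'.drop ((tokL j).length - 1) with hrest
  have hrlen : rest.length ≤ m := by
    simp [hrest, List.length_drop]
    omega
  obtain ⟨ihA, ihB⟩ := ih rest hrlen (used.add (j:Int))
  constructor
  · rw [hscan]
    simp only
    rw [ihA, hsplit, (stage_decomp hj hcf rest).2 5 (by omega) le_rfl]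
  · intro k hk
    rw [hscan]
    simp only
    rw [ihB k hk, hsplit]
    rw [flag_decomp hj hcf rest k hk]
    have hmem : PySem.Set.contains (used.add (j:Int)) (k:Int) = true ↔
        (PySem.Set.contains used (k:Int) = true ∨ k = j) := by
      rw [PySem.Set.contains_iff, PySem.Set.mem_add, PySem.Set.contains_iff]
      constructor
      · rintro (h | h)
        · exact Or.inl h
        · exact Or.inr (by exact_mod_cast h)
      · rintro (h | h)
        · exact Or.inl h
        · exact Or.inr (by exact_mod_cast h)
    rw [hmem]
    tauto

lemma henum : PySem.List.enumerate pvTokensB 0 =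
    [((0:Int), "IBTK::FACPreconditioner"), (1, "IBTK::FACPreconditionerStrategy"),
     (2, "IBMethod"), (3, "IBStrategy"), (4, "IBImplicitStrategy")] := by decide

lemma scan_none {m : Nat}
    (ih : ∀ cs : List Char, cs.length ≤ m → ∀ used : PySem.Set Int, SP cs used)
    {c : Char} {cs' : List Char} (hlen : cs'.length ≤ m) (used : PySem.Set Int)
    (hall : ∀ i, i < 5 → ¬ tokL i <+: (c :: cs'))
    (hfind : (PySem.List.enumerate pvTokensB 0).find? (fun p => p.2.toList.isPrefixOf (c :: cs'))
       = none) :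
    SP (c :: cs') used := by
  have hscan : pvScan (c :: cs') used = (c :: (pvScan cs' used).1, (pvScan cs' used).2) := by
    rw [pvScan, hfind]
  obtain ⟨ihA, ihB⟩ := ih cs' hlen used
  constructor
  · rw [hscan]
    simp only
    rw [ihA, stage_cons hall 5 le_rfl]
  · intro k hk
    rw [hscan]
    simp only
    rw [ihB k hk, flag_cons hall k hk]

lemma scan_main : ∀ n : Nat, ∀ cs : List Char, cs.length ≤ n → ∀ used : PySem.Set Int,
    SP cs used := by
  intro n
  induction n with
  | zero =>
    intro cs hcs used
    have : cs = [] := by cases cs <;> simp_all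
    subst this
    exact scan_nil used
  | succ m ih =>
    intro cs hcs used
    cases cs with
    | nil => exact scan_nil used
    | cons c cs' =>
      have hlen : cs'.length ≤ m := by simpa using Nat.le_of_succ_le_succ hcs
      by_cases h0 : tokL 0 <+: (c :: cs')
      · refine scan_step (by omega) (fun i hi => absurd hi (Nat.not_lt_zero i)) ih hlen used h0 ?_
        rw [henum]
        exact List.find?_cons_of_pos (by rw [List.isPrefixOf_iff_prefix]; exact h0)
      · have e0 : ¬ ("IBTK::FACPreconditioner".toList.isPrefixOf (c :: cs') = true) :=
          fun hb => h0 (List.isPrefixOf_iff_prefix.mp hb)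
        have h1 : ¬ tokL 1 <+: (c :: cs') := fun h => h0 (fact_tok01.trans h)
        have e1 : ¬ ("IBTK::FACPreconditionerStrategy".toList.isPrefixOf (c :: cs') = true) :=
          fun hb => h1 (List.isPrefixOf_iff_prefix.mp hb)
        by_cases h2 : tokL 2 <+: (c :: cs')
        · refine scan_step (by omega) (fact_cf_tok 2 (by omega) (by omega)) ih hlen used h2 ?_
          rw [henum, List.find?_cons_of_neg (by exact e0), List.find?_cons_of_neg (by exact e1)]
          exact List.find?_cons_of_pos (by rw [List.isPrefixOf_iff_prefix]; exact h2)
        · have e2 : ¬ ("IBMethod".toList.isPrefixOf (c :: cs') = true) :=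
            fun hb => h2 (List.isPrefixOf_iff_prefix.mp hb)
          by_cases h3 : tokL 3 <+: (c :: cs')
          · refine scan_step (by omega) (fact_cf_tok 3 (by omega) (by omega)) ih hlen used h3 ?_
            rw [henum, List.find?_cons_of_neg (by exact e0), List.find?_cons_of_neg (by exact e1),
              List.find?_cons_of_neg (by exact e2)]
            exact List.find?_cons_of_pos (by rw [List.isPrefixOf_iff_prefix]; exact h3)
          · have e3 : ¬ ("IBStrategy".toList.isPrefixOf (c :: cs') = true) :=
              fun hb => h3 (List.isPrefixOf_iff_prefix.mp hb)
            by_cases h4 : tokL 4 <+: (c :: cs')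
            · refine scan_step (by omega) (fact_cf_tok 4 (by omega) (by omega)) ih hlen used h4 ?_
              rw [henum, List.find?_cons_of_neg (by exact e0), List.find?_cons_of_neg (by exact e1),
                List.find?_cons_of_neg (by exact e2), List.find?_cons_of_neg (by exact e3)]
              exact List.find?_cons_of_pos (by rw [List.isPrefixOf_iff_prefix]; exact h4)
            · have e4 : ¬ ("IBImplicitStrategy".toList.isPrefixOf (c :: cs') = true) :=
                fun hb => h4 (List.isPrefixOf_iff_prefix.mp hb)
              have hall : ∀ i, i < 5 → ¬ tokL i <+: (c :: cs') := by
                intro i hi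
                interval_cases i <;> assumption
              refine scan_none ih hlen used hall ?_
              rw [henum, List.find?_cons_of_neg (by exact e0), List.find?_cons_of_neg (by exact e1),
                List.find?_cons_of_neg (by exact e2), List.find?_cons_of_neg (by exact e3),
                List.find?_cons_of_neg (by exact e4), List.find?_nil]

lemma portB_char : ∀ text : String,
    mask_protected_code_tokens_py_alt text =
      (String.ofList (stage 5 text.toList), (dAfter text.toList 5).items) := by
  intro text
  obtain ⟨hA, hB⟩ := scan_main text.toList.length text.toList le_rfl ([] : PySem.Set Int)
  have hm : ∀ k : Nat, k < 5 →
      (((k:Nat):Int) ∈ (pvScan text.toList ([] : PySem.Set Int)).2 ↔ flagP k text.toList) := by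
    intro k hk
    have h' := hB k hk
    simp only [PySem.Set.contains_iff] at h'
    simpa using h'
  have hm0 : ((0:Int) ∈ (pvScan text.toList ([] : PySem.Set Int)).2 ↔ flagP 0 text.toList) := by
    simpa using hm 0 (by omega)
  have hm1 : ((1:Int) ∈ (pvScan text.toList ([] : PySem.Set Int)).2 ↔ flagP 1 text.toList) := by
    simpa using hm 1 (by omega)
  have hm2 : ((2:Int) ∈ (pvScan text.toList ([] : PySem.Set Int)).2 ↔ flagP 2 text.toList) := by
    simpa using hm 2 (by omega)
  have hm3 : ((3:Int) ∈ (pvScan text.toList ([] : PySem.Set Int)).2 ↔ flagP 3 text.toList) := by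
    simpa using hm 3 (by omega)
  have hm4 : ((4:Int) ∈ (pvScan text.toList ([] : PySem.Set Int)).2 ↔ flagP 4 text.toList) := by
    simpa using hm 4 (by omega)
  have hrange : (PySem.List.pyRange 0 (pvTokensB.length : Int) 1)
      = [((0:Nat):Int), ((1:Nat):Int), ((2:Nat):Int), ((3:Nat):Int), ((4:Nat):Int)] := by decide
  unfold mask_protected_code_tokens_py_alt
  simp only [show (PySem.Set.empty : PySem.Set Int) = [] from rfl]
  refine Prod.ext ?_ ?_
  · simp only
    rw [hA]
  · simp only
    rw [hrange]
    by_cases f0 : flagP 0 text.toList <;> by_cases f1 : flagP 1 text.toList <;>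
      by_cases f2 : flagP 2 text.toList <;> by_cases f3 : flagP 3 text.toList <;>
      by_cases f4 : flagP 4 text.toList <;>
      simp [List.filter_nil, hm0, hm1, hm2, hm3, hm4, f0, f1, f2, f3, f4,
        dAfter] <;>
      decide

-- ===== VERDICT (by name: the statement is the Claim_ definition above) =====
theorem mask_protected_code_tokens_py_spec : Claim_equal_mask_protected_code_tokens_py := by
  intro text _
  unfold Spec_mask_protected_code_tokens_py
  rw [portA_char, portB_char]
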